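-- pv_equiv track=rewrite | github.com/nick75g/FFXIV-Crossbreed-Helper | functions.py | make_pairs
-- ===== SOURCE A (Python) =====
-- def make_pairs(seedlist):
--
--     seedlist.sort()
--
--     if len(seedlist) == 2:
--         return [seedlist]
--
--     templist = []
--
--     for x in seedlist:
--         temp = seedlist.copy()
--         temp.remove(x)
--         for y in temp:
--             templist.append([x,y])
--
--     for item in templist:
--         item.sort()
--
--     output = []
--
--     for item in templist:
--         if item not in output:
--             output.append(item)
--
--     return output
-- ===== SOURCE B (Python) =====
-- def make_pairs(seedlist):
--     seedlist.sort()
--     output = []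
--     rest = seedlist
--     while rest:
--         x, rest = rest[0], rest[1:]
--         for y in rest:
--             pair = [x, y]
--             if pair not in output:
--                 output.append(pair)
--     return output
-- ===== Notes on version B (the rewrite author's own statement) =====
-- stated objective: simpler
-- what changed: Instead of building all n*(n-1) ordered pairs via copy/remove, sorting each pair, and deduplicating in a separate pass (plus a len==2 special case), B sorts once and emits already-ascending i<j pairs in a single pass over the sorted list's suffixes with an inline first-seen filter.
import Mathlib
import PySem

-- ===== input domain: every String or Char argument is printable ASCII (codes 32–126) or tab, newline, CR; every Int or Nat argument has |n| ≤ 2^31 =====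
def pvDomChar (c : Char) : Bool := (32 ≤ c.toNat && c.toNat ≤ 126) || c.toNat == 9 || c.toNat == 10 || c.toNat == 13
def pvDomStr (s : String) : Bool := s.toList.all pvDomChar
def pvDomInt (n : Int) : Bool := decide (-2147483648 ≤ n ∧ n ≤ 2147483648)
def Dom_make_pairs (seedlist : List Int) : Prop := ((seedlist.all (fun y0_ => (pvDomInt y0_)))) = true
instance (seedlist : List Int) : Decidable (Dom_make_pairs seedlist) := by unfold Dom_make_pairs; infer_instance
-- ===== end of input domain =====

-- B replaces A's build-all-ordered-pairs / per-pair-sort / separate dedup pass (and the len==2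
-- special case) by one pass over the sorted list's suffixes emitting already-ascending pairs
-- with an inline first-seen filter (objective: simpler). Both A and B sort seedlist in place;
-- the equivalence proved here is about the return value (the mutation is identical anyway).

-- ===== PORT A =====
def make_pairs (seedlist : List Int) : List (List Int) :=
  let seedlist := PySem.List.sorted seedlist (fun v => v) false
  if seedlist.length = 2 then
    [seedlist]
  else
    let templist := seedlist.foldl (fun templist x =>
      -- temp = seedlist.copy(); temp.remove(x): x ∈ seedlist, so remove never raises
      let temp := (PySem.List.remove? seedlist x).getD []
      temp.foldl (fun templist y => templist ++ [[x, y]]) templist) []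
    let templist := templist.map (fun item => PySem.List.sorted item (fun v => v) false)
    templist.foldl (fun output item => if item ∈ output then output else output ++ [item]) []

-- ===== PORT B =====
-- while rest: x, rest = rest[0], rest[1:]; for y in rest: append [x,y] if unseen
def pvPairsLoop (output : List (List Int)) : List Int → List (List Int)
  | [] => output
  | x :: rest =>
      pvPairsLoop (rest.foldl (fun output y =>
        if [x, y] ∈ output then output else output ++ [[x, y]]) output) rest

def make_pairs_alt (seedlist : List Int) : List (List Int) :=
  pvPairsLoop [] (PySem.List.sorted seedlist (fun v => v) false)

-- ===== PRECONDITION & SPEC =====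
def Spec_make_pairs (seedlist : List Int) (out : List (List Int)) : Prop := out = make_pairs_alt seedlist
instance (seedlist : List Int) (out : List (List Int)) : Decidable (Spec_make_pairs seedlist out) := by unfold Spec_make_pairs; infer_instance

-- ===== CLAIM (what is proved, stated in full; the proofs are below) =====
def Claim_equal_make_pairs : Prop := ∀ (seedlist : List Int), Dom_make_pairs seedlist → Spec_make_pairs seedlist (make_pairs seedlist)

-- ===== LEMMAS AND PROOFS =====

-- the first-seen dedup step ('if item not in output: output.append(item)')
def dstep (out : List (List Int)) (item : List Int) : List (List Int) :=
  if item ∈ out then out else out ++ [item]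

lemma mem_foldl_dstep (l : List (List Int)) (out : List (List Int)) (p : List Int) :
    p ∈ l.foldl dstep out ↔ p ∈ out ∨ p ∈ l := by
  induction l generalizing out with
  | nil => simp
  | cons a l ih =>
      simp only [List.foldl_cons, ih, dstep]
      split_ifs with h
      · constructor
        · rintro (hp | hp) <;> simp [hp]
        · rintro (hp | hp)
          · exact Or.inl hp
          · rcases List.mem_cons.mp hp with rfl | hp
            · exact Or.inl h
            · exact Or.inr hp
      · simp [List.mem_append, List.mem_cons, or_assoc, or_comm, or_left_comm]
      
lemma foldl_dstep_of_subset (l : List (List Int)) (out : List (List Int))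
    (h : ∀ p ∈ l, p ∈ out) : l.foldl dstep out = out := by
  induction l generalizing out with
  | nil => rfl
  | cons a l ih =>
      have ha : a ∈ out := h a (by simp)
      simp only [List.foldl_cons, dstep, if_pos ha]
      exact ih out (fun p hp => h p (by simp [hp]))

lemma foldl_dstep_flatMap {α : Type} (h : α → List (List Int)) :
    ∀ (l : List α) (out : List (List Int)),
      (l.flatMap h).foldl dstep out = l.foldl (fun out x => (h x).foldl dstep out) out := by
  intro l
  induction l with
  | nil => intro out; rfl
  | cons a l ih => intro out; simp [List.flatMap_cons, List.foldl_append, ih]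

lemma sorted_pair_le {a b : Int} (h : a ≤ b) :
    PySem.List.sorted [a, b] (fun v => v) false = [a, b] :=
  PySem.List.sorted_eq_self_of_pairwise [a, b] (fun v => v) (by simp [h])

lemma sorted_pair_ge {a b : Int} (h : b ≤ a) :
    PySem.List.sorted [a, b] (fun v => v) false = [b, a] :=
  PySem.List.sorted_id_eq_of_perm_of_pairwise [a, b] [b, a] (List.Perm.swap a b []) (by simp [h])

-- the core invariant: folding A's rows (pairs of x with seedlist-minus-x, each pair sorted)
-- over the remaining suffix equals B's suffix loop, provided out already holds every pair
-- [z, w] with z among the processed prefix and w in the suffix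
lemma rowfold_eq (t : List Int) (hs : t.Pairwise (· ≤ ·)) :
    ∀ (suffix pre : List Int) (out : List (List Int)),
      t = pre ++ suffix →
      (∀ z w, z ∈ pre → w ∈ suffix → [z, w] ∈ out) →
      suffix.foldl (fun out x =>
          (((PySem.List.remove? t x).getD []).map
              (fun y => PySem.List.sorted [x, y] (fun v => v) false)).foldl dstep out) out
        = pvPairsLoop out suffix := by
  intro suffix
  induction suffix with
  | nil => intro pre out _ _; rfl
  | cons x rest ih =>
      intro pre out ht H
      have hxt : x ∈ t := by simp [ht]
      have hrem : (PySem.List.remove? t x).getD [] = t.erase x := by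
        rw [PySem.List.remove?_eq_some_erase t x hxt]; rfl
      have hpw := ht ▸ hs
      have hprex : ∀ z ∈ pre, z ≤ x := by
        intro z hz
        exact (List.pairwise_append.mp hpw).2.2 z hz x (by simp)
      have hxrest : ∀ z ∈ rest, x ≤ z := by
        intro z hz
        have : (x :: rest).Pairwise (· ≤ ·) := (List.pairwise_append.mp hpw).2.1
        exact (List.pairwise_cons.mp this).1 z hz
      -- A's row fold equals B's inner fold
      have hrow : (((PySem.List.remove? t x).getD []).map
            (fun y => PySem.List.sorted [x, y] (fun v => v) false)).foldl dstep out
          = (rest.map (fun y => [x, y])).foldl dstep out := by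
        rw [hrem]
        by_cases hx : x ∈ pre
        · -- duplicate value: the whole row is already in out, and so is B's row
          rw [ht, List.erase_append_left _ hx]
          have h1 : (((pre.erase x) ++ x :: rest).map
              (fun y => PySem.List.sorted [x, y] (fun v => v) false)).foldl dstep out = out := by
            apply foldl_dstep_of_subset
            intro p hp
            simp only [List.mem_map] at hp
            obtain ⟨z, hz, rfl⟩ := hp
            rcases List.mem_append.mp hz with hz | hz
            · have hz' : z ∈ pre := List.mem_of_mem_erase hz
              rw [sorted_pair_ge (hprex z hz')]
              exact H z x hz' (by simp)
            · rcases List.mem_cons.mp hz with rfl | hz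
              · rw [sorted_pair_le le_rfl]
                exact H z z hx (by simp)
              · rw [sorted_pair_le (hxrest z hz)]
                exact H x z hx (by simp [hz])
          have h2 : (rest.map (fun y => [x, y])).foldl dstep out = out := by
            apply foldl_dstep_of_subset
            intro p hp
            simp only [List.mem_map] at hp
            obtain ⟨z, hz, rfl⟩ := hp
            exact H x z hx (by simp [hz])
          rw [h1, h2]
        · -- first occurrence: the prefix part of the row is absorbed, the rest is B's row
          rw [ht, List.erase_append_right _ hx, List.erase_cons_head, List.map_append,
              List.foldl_append]
          have h1 : (pre.map (fun y => PySem.List.sorted [x, y] (fun v => v) false)).foldl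
              dstep out = out := by
            apply foldl_dstep_of_subset
            intro p hp
            simp only [List.mem_map] at hp
            obtain ⟨z, hz, rfl⟩ := hp
            rw [sorted_pair_ge (hprex z hz)]
            exact H z x hz (by simp)
          rw [h1]
          congr 1
          apply List.map_congr_left
          intro z hz
          exact sorted_pair_le (hxrest z hz)
      rw [List.foldl_cons, hrow]
      show _ = pvPairsLoop (rest.foldl (fun output y =>
        if [x, y] ∈ output then output else output ++ [[x, y]]) out) rest
      have hB : rest.foldl (fun output y =>
            if [x, y] ∈ output then output else output ++ [[x, y]]) out
          = (rest.map (fun y => [x, y])).foldl dstep out := by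
        rw [List.foldl_map]; rfl
      rw [hB]
      apply ih (pre ++ [x])
      · simp [ht]
      · intro z w hz hw
        rw [mem_foldl_dstep]
        rcases List.mem_append.mp hz with hz | hz
        · exact Or.inl (H z w hz (by simp [hw]))
        · simp only [List.mem_singleton] at hz
          subst hz
          exact Or.inr (List.mem_map_of_mem hw)

-- ===== VERDICT (by name: the statement is the Claim_ definition above) =====
theorem make_pairs_spec : Claim_equal_make_pairs := by
  intro seedlist _
  unfold Spec_make_pairs make_pairs make_pairs_alt
  set t := PySem.List.sorted seedlist (fun v => v) false with hts
  have hsort : t.Pairwise (· ≤ ·) := by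
    simpa using PySem.List.sorted_pairwise seedlist (fun v => v)
  by_cases h2 : t.length = 2
  · rw [if_pos h2]
    obtain ⟨a, b, hab⟩ := List.length_eq_two.mp h2
    rw [hab]
    simp [pvPairsLoop]
  · rw [if_neg h2]
    show ((t.foldl (fun templist x =>
        ((PySem.List.remove? t x).getD []).foldl
          (fun templist y => templist ++ [[x, y]]) templist) []).map
          (fun item => PySem.List.sorted item (fun v => v) false)).foldl dstep []
        = pvPairsLoop [] t
    have h1 : t.foldl (fun templist x =>
        ((PySem.List.remove? t x).getD []).foldl
          (fun templist y => templist ++ [[x, y]]) templist) []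
        = t.flatMap (fun x => ((PySem.List.remove? t x).getD []).map (fun y => [x, y])) := by
      simp only [PySem.List.foldl_append_singleton_eq_map]
      simp only [PySem.List.foldl_append_eq_flatMap, List.nil_append]
    rw [h1, List.map_flatMap]
    have h3 : ∀ x : Int, (((PySem.List.remove? t x).getD []).map (fun y => [x, y])).map
          (fun item => PySem.List.sorted item (fun v => v) false)
        = ((PySem.List.remove? t x).getD []).map
            (fun y => PySem.List.sorted [x, y] (fun v => v) false) := by
      intro x; rw [List.map_map]; rfl
    simp only [h3]
    rw [foldl_dstep_flatMap]
    exact rowfold_eq t hsort t [] [] rfl (by simp)
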